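-- pv_equiv track=rewrite | github.com/Bolat77777/Photo_Finder1 | main.py | generate_variants_combinations
-- ===== SOURCE A (Python) =====
-- import itertools
--
-- def generate_variants_combinations(s, mapping, max_subs=7):
--     """
--     Генерирует варианты строки s, заменяя символы согласно mapping,
--     выполняя от 1 до max_subs замен на различных позициях.
--     Возвращает список уникальных вариантов.
--     """
--     indices = [i for i, ch in enumerate(s) if ch in mapping]
--     variants = set()
--     for r in range(1, max_subs + 1):
--         for combo in itertools.combinations(indices, r):
--             s_list = list(s)
--             for idx in combo:
--                 s_list[idx] = mapping[s_list[idx]]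
--             variant = "".join(s_list)
--             variants.add(variant)
--     return list(variants)
-- ===== SOURCE B (Python) =====
-- def _substituted(chars, idx, mapping):
--     cur = list(chars)
--     cur[idx] = mapping[cur[idx]]
--     return cur
--
--
-- def _extensions(rest, chars, mapping):
--     """All one-substitution extensions of a partial variant: substitute at the
--     first remaining position, the second, ...; each paired with the positions
--     still available after it."""
--     out = []
--     while rest:
--         idx, rest = rest[0], rest[1:]
--         out.append((rest, _substituted(chars, idx, mapping)))
--     return out
--
--
-- def generate_variants_combinations(s, mapping, max_subs=7):
--     """Layered expansion instead of combinations-by-size: round r extends every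
--     (r-1)-substitution partial variant by one more substitution at a later
--     position, so round r yields exactly the r-substitution variants; stops as
--     soon as no partial variant can be extended."""
--     indices = [i for i, ch in enumerate(s) if ch in mapping]
--     variants = set()
--     layer = [(indices, list(s))]
--     steps = 0
--     while layer and steps < max_subs:
--         nxt = []
--         for rest, chars in layer:
--             nxt.extend(_extensions(rest, chars, mapping))
--         layer = nxt
--         for _rest, cur in layer:
--             variants.add("".join(cur))
--         steps += 1
--     return list(variants)
-- ===== Notes on version B (the rewrite author's own statement) =====
-- stated objective: faster
-- what changed: Replaces the combinations-by-size enumeration (itertools.combinations for each r in range(1, max_subs+1), re-applying every substitution from scratch) with a layered expansion that extends each (r-1)-substitution partial variant by one further substitution at a later position, reusing partial results and stopping as soon as no partial variant can be extended.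
import Mathlib
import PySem

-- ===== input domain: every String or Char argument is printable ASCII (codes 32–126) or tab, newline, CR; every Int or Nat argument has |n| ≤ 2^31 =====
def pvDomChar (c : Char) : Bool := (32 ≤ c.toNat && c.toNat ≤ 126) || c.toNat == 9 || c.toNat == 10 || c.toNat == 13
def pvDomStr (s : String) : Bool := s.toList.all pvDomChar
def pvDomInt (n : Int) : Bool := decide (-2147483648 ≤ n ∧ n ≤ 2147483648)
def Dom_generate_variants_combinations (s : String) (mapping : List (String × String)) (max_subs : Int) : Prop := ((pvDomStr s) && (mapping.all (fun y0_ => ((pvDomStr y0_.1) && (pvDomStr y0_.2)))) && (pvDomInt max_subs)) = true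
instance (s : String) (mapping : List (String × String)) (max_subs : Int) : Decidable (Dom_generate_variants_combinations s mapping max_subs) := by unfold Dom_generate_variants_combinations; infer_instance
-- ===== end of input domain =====

-- B replaces the combinations-by-size enumeration with a layered one-more-substitution
-- expansion that reuses partial variants and stops the round loop as soon as none can be
-- extended (measurably faster: A's round loop always runs max_subs times).

-- ===== PORT A =====
-- s_list[idx] = mapping[s_list[idx]]  (cells are List Char; the key is always present, so getD's default is never used)
def pvSubst (md : PySem.Dict (List Char) (List Char)) (chars : List (List Char)) (idx : Int) : List (List Char) :=
  PySem.List.pySetD chars idx (PySem.Dict.getD md (PySem.List.pyGetD chars idx []) [])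

def generate_variants_combinations (s : String) (mapping : List (String × String)) (max_subs : Int) : List String :=
  let md : PySem.Dict (List Char) (List Char) := PySem.Dict.mk (mapping.map (fun p => (p.1.toList, p.2.toList)))
  let cs : List Char := s.toList
  let indices : List Int :=
    ((PySem.List.enumerate cs).filter (fun p => PySem.Dict.contains md [p.2])).map (·.1)
  (PySem.List.pyRange 1 (max_subs + 1) 1).foldl (fun vs r =>
      (PySem.List.combinations indices r.toNat).foldl (fun vs combo =>
          PySem.Set.add vs
            (String.ofList (combo.foldl (fun cl idx => pvSubst md cl idx)
                (cs.map (fun c => [c]))).flatten)) vs)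
    PySem.Set.empty

-- ===== PORT B =====
-- _extensions(rest, chars, mapping)
def pvExts (md : PySem.Dict (List Char) (List Char)) :
    List Int → List (List Char) → List (List Int × List (List Char))
  | [], _ => []
  | idx :: rest, chars => (rest, pvSubst md chars idx) :: pvExts md rest chars

-- the while-loop of B: fuel = remaining allowed substitutions
def pvLoopB (md : PySem.Dict (List Char) (List Char)) :
    Nat → List (List Int × List (List Char)) → PySem.Set String → PySem.Set String
  | 0, _, vs => vs
  | fuel + 1, layer, vs =>
    if layer.isEmpty then vs
    else
      pvLoopB md fuel (layer.foldl (fun acc rc => acc ++ pvExts md rc.1 rc.2) [])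
        ((layer.foldl (fun acc rc => acc ++ pvExts md rc.1 rc.2) []).foldl
          (fun vs rc => PySem.Set.add vs (String.ofList rc.2.flatten)) vs)

def generate_variants_combinations_alt (s : String) (mapping : List (String × String)) (max_subs : Int) : List String :=
  let md : PySem.Dict (List Char) (List Char) := PySem.Dict.mk (mapping.map (fun p => (p.1.toList, p.2.toList)))
  let cs : List Char := s.toList
  let indices : List Int :=
    ((PySem.List.enumerate cs).filter (fun p => PySem.Dict.contains md [p.2])).map (·.1)
  pvLoopB md max_subs.toNat [(indices, cs.map (fun c => [c]))] PySem.Set.empty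

-- ===== PRECONDITION & SPEC =====
def Spec_generate_variants_combinations (s : String) (mapping : List (String × String)) (max_subs : Int) (out : List String) : Prop := out = generate_variants_combinations_alt s mapping max_subs
instance (s : String) (mapping : List (String × String)) (max_subs : Int) (out : List String) : Decidable (Spec_generate_variants_combinations s mapping max_subs out) := by unfold Spec_generate_variants_combinations; infer_instance

-- ===== CLAIM (what is proved, stated in full; the proofs are below) =====
def Claim_equal_generate_variants_combinations : Prop := ∀ (s : String) (mapping : List (String × String)) (max_subs : Int), Dom_generate_variants_combinations s mapping max_subs → Spec_generate_variants_combinations s mapping max_subs (generate_variants_combinations s mapping max_subs)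

-- ===== LEMMAS AND PROOFS =====

-- combinations together with the suffix of candidates remaining after the last chosen element
def pvCWR : List Int → Nat → List (List Int × List Int)
  | xs, 0 => [([], xs)]
  | [], _ + 1 => []
  | x :: xs, r + 1 => (pvCWR xs r).map (fun p => (x :: p.1, p.2)) ++ pvCWR xs (r + 1)

lemma pvCWR_fst (xs : List Int) (r : Nat) :
    (pvCWR xs r).map (·.1) = PySem.List.combinations xs r := by
  induction xs generalizing r with
  | nil => cases r <;> simp [pvCWR, PySem.List.combinations_zero, PySem.List.combinations_nil_succ]
  | cons x xs ih =>
    cases r with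
    | zero => simp [pvCWR, PySem.List.combinations_zero]
    | succ r =>
      simp [pvCWR, PySem.List.combinations_cons_succ, ← ih, List.map_map]

-- (position chosen, suffix after it) for every position of xs
def pvEP : List Int → List (Int × List Int)
  | [] => []
  | x :: xs => (x, xs) :: pvEP xs

lemma pvExts_eq_map_pvEP (md : PySem.Dict (List Char) (List Char)) (rest : List Int)
    (chars : List (List Char)) :
    pvExts md rest chars = (pvEP rest).map (fun q => (q.2, pvSubst md chars q.1)) := by
  induction rest with
  | nil => rfl
  | cons x xs ih => simp [pvExts, pvEP, ih]

-- one expansion step on combination-with-rest pairs goes up one size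
lemma pvCWR_step (xs : List Int) (r : Nat) :
    (pvCWR xs r).flatMap (fun p => (pvEP p.2).map (fun q => (p.1 ++ [q.1], q.2)))
      = pvCWR xs (r + 1) := by
  induction xs generalizing r with
  | nil => cases r <;> simp [pvCWR, pvEP]
  | cons x xs ih =>
    cases r with
    | zero =>
      have h0 := ih 0
      simp [pvCWR, pvEP] at h0 ⊢
      simpa using h0
    | succ r =>
      have h1 := ih r
      have h2 := ih (r + 1)
      simp [pvCWR, List.flatMap_append, List.flatMap_map, ← h1, ← h2, List.map_flatMap,
        List.map_map, Function.comp_def]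

-- ===== combining layers with the substitution state =====

def pvApply (md : PySem.Dict (List Char) (List Char)) (c0 : List (List Char)) (combo : List Int) :
    List (List Char) := combo.foldl (fun cl idx => pvSubst md cl idx) c0

def pvLayer (md : PySem.Dict (List Char) (List Char)) (xs : List Int) (c0 : List (List Char)) :
    Nat → List (List Int × List (List Char))
  | 0 => [(xs, c0)]
  | r + 1 => (pvLayer md xs c0 r).foldl (fun acc rc => acc ++ pvExts md rc.1 rc.2) []

lemma pvLayer_eq (md : PySem.Dict (List Char) (List Char)) (xs : List Int)
    (c0 : List (List Char)) (r : Nat) :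
    pvLayer md xs c0 r = (pvCWR xs r).map (fun p => (p.2, pvApply md c0 p.1)) := by
  induction r with
  | zero => simp [pvLayer, pvCWR, pvApply]
  | succ r ih =>
    rw [pvLayer, ih, PySem.List.foldl_append_eq_flatMap, List.nil_append, List.flatMap_map,
      ← pvCWR_step xs r, List.map_flatMap]
    apply List.flatMap_congr
    intro p _
    rw [pvExts_eq_map_pvEP, List.map_map]
    apply List.map_congr_left
    intro q _
    simp [pvApply, List.foldl_append]

-- the strings emitted at level r
def pvStrs (md : PySem.Dict (List Char) (List Char)) (xs : List Int) (c0 : List (List Char))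
    (r : Nat) : List String :=
  (PySem.List.combinations xs r).map (fun combo => String.ofList (pvApply md c0 combo).flatten)

lemma pvLayer_strs (md : PySem.Dict (List Char) (List Char)) (xs : List Int)
    (c0 : List (List Char)) (r : Nat) :
    (pvLayer md xs c0 r).map (fun rc => String.ofList rc.2.flatten) = pvStrs md xs c0 r := by
  rw [pvLayer_eq, pvStrs, ← pvCWR_fst, List.map_map, List.map_map]
  rfl

-- folding updates is one update by the concatenation
lemma pvLayer_empty_mono (md : PySem.Dict (List Char) (List Char)) (xs : List Int)
    (c0 : List (List Char)) (t k : Nat) (h : pvLayer md xs c0 t = []) :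
    pvLayer md xs c0 (t + k) = [] := by
  induction k with
  | zero => exact h
  | succ k ih => rw [show t + (k + 1) = (t + k) + 1 by omega]; rw [pvLayer, ih]; rfl

-- the B loop, characterised
lemma pvLoopB_eq (md : PySem.Dict (List Char) (List Char)) (xs : List Int)
    (c0 : List (List Char)) (n : Nat) : ∀ (t : Nat) (vs : PySem.Set String),
    pvLoopB md n (pvLayer md xs c0 t) vs
      = PySem.Set.update vs ((List.range n).map (fun j => pvStrs md xs c0 (t + 1 + j))).flatten := by
  induction n with
  | zero => intro t vs; simp [pvLoopB, PySem.Set.update]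
  | succ n ih =>
    intro t vs
    rw [pvLoopB]
    by_cases h : pvLayer md xs c0 t = []
    · rw [if_pos (by simp [h])]
      have hstrs : ∀ j : Nat, pvStrs md xs c0 (t + 1 + j) = [] := by
        intro j
        have he : pvLayer md xs c0 (t + 1 + j) = [] := by
          rw [show t + 1 + j = t + (1 + j) by omega]
          exact pvLayer_empty_mono md xs c0 t (1 + j) h
        rw [← pvLayer_strs, he]; rfl
      have hz : ((List.range (n + 1)).map (fun j => pvStrs md xs c0 (t + 1 + j))).flatten = [] := by
        simp [hstrs]
      rw [hz]; rfl
    · rw [if_neg (by simp [List.isEmpty_iff, h])]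
      have hnext : (pvLayer md xs c0 t).foldl (fun acc rc => acc ++ pvExts md rc.1 rc.2) []
          = pvLayer md xs c0 (t + 1) := rfl
      rw [hnext]
      have hadd : (pvLayer md xs c0 (t + 1)).foldl
            (fun vs rc => PySem.Set.add vs (String.ofList rc.2.flatten)) vs
          = PySem.Set.update vs (pvStrs md xs c0 (t + 1)) := by
        rw [← pvLayer_strs, PySem.Set.update_map_eq_foldl_add]
      rw [hadd, ih (t + 1)]
      rw [List.range_succ_eq_map, List.map_cons, List.flatten_cons, List.map_map,
        PySem.Set.update_append]
      have h2 : (List.map ((fun j => pvStrs md xs c0 (t + 1 + j)) ∘ Nat.succ) (List.range n))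
          = List.map (fun j => pvStrs md xs c0 (t + 1 + 1 + j)) (List.range n) := by
        apply List.map_congr_left
        intro j _
        simp only [Function.comp_apply]
        congr 1
        omega
      rw [h2]

-- the A fold, characterised (first for a Nat bound, by induction on the last round)
lemma pvFoldA_nat (md : PySem.Dict (List Char) (List Char)) (xs : List Int)
    (c0 : List (List Char)) (n : Nat) :
    (PySem.List.pyRange 1 ((n : Int) + 1) 1).foldl (fun vs r =>
        (PySem.List.combinations xs r.toNat).foldl (fun vs combo =>
            PySem.Set.add vs (String.ofList (pvApply md c0 combo).flatten)) vs)
      PySem.Set.empty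
      = PySem.Set.update PySem.Set.empty
          ((List.range n).map (fun j => pvStrs md xs c0 (j + 1))).flatten := by
  induction n with
  | zero =>
    rw [show ((0 : Nat) : Int) + 1 = 1 by norm_num]
    rw [show PySem.List.pyRange 1 1 1 = [] from rfl]
    simp [PySem.Set.update]
  | succ n ih =>
    rw [show ((n + 1 : Nat) : Int) + 1 = ((n : Int) + 1) + 1 by push_cast; ring]
    rw [PySem.List.pyRange_one_succ_right (by omega), List.foldl_append]
    rw [ih]
    simp only [List.foldl_cons, List.foldl_nil]
    have htn : ((n : Int) + 1).toNat = n + 1 := by omega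
    rw [htn, ← PySem.Set.update_map_eq_foldl_add]
    rw [List.range_succ, List.map_append, List.flatten_append, PySem.Set.update_append]
    simp [pvStrs]

lemma pvFoldA_eq (md : PySem.Dict (List Char) (List Char)) (xs : List Int)
    (c0 : List (List Char)) (m : Int) :
    (PySem.List.pyRange 1 (m + 1) 1).foldl (fun vs r =>
        (PySem.List.combinations xs r.toNat).foldl (fun vs combo =>
            PySem.Set.add vs (String.ofList (pvApply md c0 combo).flatten)) vs)
      PySem.Set.empty
      = PySem.Set.update PySem.Set.empty
          ((List.range m.toNat).map (fun j => pvStrs md xs c0 (j + 1))).flatten := by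
  have hr : PySem.List.pyRange 1 (m + 1) 1 = PySem.List.pyRange 1 ((m.toNat : Int) + 1) 1 := by
    rw [PySem.List.pyRange_of_pos 1 (m + 1) Int.zero_lt_one,
      PySem.List.pyRange_of_pos 1 ((m.toNat : Int) + 1) Int.zero_lt_one]
    congr 2
    split_ifs <;> omega
  rw [hr, pvFoldA_nat]

-- ===== VERDICT (by name: the statement is the Claim_ definition above) =====
theorem generate_variants_combinations_spec : Claim_equal_generate_variants_combinations := by
  intro s mapping max_subs _
  unfold Spec_generate_variants_combinations
  have main : ∀ (md : PySem.Dict (List Char) (List Char)) (ind : List Int)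
      (c0 : List (List Char)) (m : Int),
      (PySem.List.pyRange 1 (m + 1) 1).foldl (fun vs r =>
          (PySem.List.combinations ind r.toNat).foldl (fun vs combo =>
              PySem.Set.add vs (String.ofList (pvApply md c0 combo).flatten)) vs)
        PySem.Set.empty
        = pvLoopB md m.toNat [(ind, c0)] PySem.Set.empty := by
    intro md ind c0 m
    rw [show ([(ind, c0)] : List (List Int × List (List Char))) = pvLayer md ind c0 0 from rfl]
    rw [pvLoopB_eq md ind c0 m.toNat 0 PySem.Set.empty, pvFoldA_eq]
    apply congrArg
    apply congrArg
    apply List.map_congr_left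
    intro j _
    congr 1
    omega
  exact main _ _ _ max_subs
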